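-- pv_equiv track=rewrite | github.com/daniel-reich/turbo-robot | Y4gwcGfcGb3SKz6Tu_10.py | max_separator
-- ===== SOURCE A (Python) =====
-- def max_separator(txt):
--   txt_dict = {}
--   for i, v in enumerate(txt):
--     if v in txt_dict:
--       txt_dict[v].append(i)
--     else:
--       txt_dict[v] = [i]
--   diff_dict = {}
--   for k, v in txt_dict.items():
--     if len(v) > 1:
--       diff_dict[k] = max([v[i+1] - v[i] for i, x in enumerate(v) if i != len(v) - 1])
--   if diff_dict:
--     max_v = max(diff_dict.values())
--     return sorted([k for k, v in diff_dict.items() if v == max_v])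
--   else:
--     return []
-- ===== SOURCE B (Python) =====
-- def max_separator(txt):
--     last = {}
--     best = {}
--     for i, v in enumerate(txt):
--         if v in last:
--             gap = i - last[v]
--             best[v] = max(best.get(v, gap), gap)
--         last[v] = i
--     if not best:
--         return []
--     m = max(best.values())
--     return sorted(k for k, g in best.items() if g == m)
-- ===== Notes on version B (the rewrite author's own statement) =====
-- stated objective: simpler
-- what changed: A materializes per-char index lists in a dict, then a second pass differences each list and builds a gap dict; B does one pass over enumerate(txt) keeping only last-seen index and running max gap per char, never storing index lists.
import Mathlib
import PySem

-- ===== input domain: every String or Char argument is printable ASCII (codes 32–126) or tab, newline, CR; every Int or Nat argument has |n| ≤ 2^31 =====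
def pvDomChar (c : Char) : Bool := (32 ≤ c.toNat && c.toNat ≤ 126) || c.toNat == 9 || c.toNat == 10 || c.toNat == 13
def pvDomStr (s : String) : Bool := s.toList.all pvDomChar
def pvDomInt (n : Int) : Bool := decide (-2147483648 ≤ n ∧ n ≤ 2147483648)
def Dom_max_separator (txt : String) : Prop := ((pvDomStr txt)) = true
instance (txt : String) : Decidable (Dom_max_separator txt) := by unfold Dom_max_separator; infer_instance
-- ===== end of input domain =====

-- B replaces A's dict of full index lists + second differencing pass by a single
-- pass keeping only the last index and the running max gap per char (objective: simpler).

-- ===== PORT A =====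
-- the list comprehension [v[i+1] - v[i] for i, x in enumerate(v) if i != len(v) - 1]
def aGaps (v : List Int) : List Int :=
  (PySem.List.enumerate v).filterMap (fun q =>
    if q.1 ≠ (v.length : Int) - 1 then
      some ((PySem.List.pyGet? v (q.1 + 1)).getD 0 - (PySem.List.pyGet? v q.1).getD 0)
    else none)

-- body of A's first loop (txt_dict)
def aStep (d : PySem.Dict Char (List Int)) (p : Int × Char) : PySem.Dict Char (List Int) :=
  if d.contains p.2 then d.modify p.2 [] (fun l => l ++ [p.1])
  else d.insert p.2 [p.1]

-- body of A's second loop (diff_dict)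
def aDiffStep (d : PySem.Dict Char Int) (kv : Char × List Int) : PySem.Dict Char Int :=
  if 1 < kv.2.length then d.insert kv.1 ((PySem.List.max? (aGaps kv.2) id).getD 0)
  else d

def max_separator (txt : String) : List String :=
  let td := (PySem.List.enumerate txt.toList).foldl aStep ⟨[]⟩
  let dd := td.items.foldl aDiffStep ⟨[]⟩
  if dd.items.isEmpty then []
  else
    let m := (PySem.List.max? dd.values id).getD 0
    PySem.List.sorted ((dd.items.filter (fun p => p.2 == m)).map (fun p => String.singleton p.1)) id

-- ===== PORT B =====
-- body of B's single loop: state = (last, best)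
def bStep (st : PySem.Dict Char Int × PySem.Dict Char Int) (p : Int × Char) :
    PySem.Dict Char Int × PySem.Dict Char Int :=
  let best := match st.1.get? p.2 with
    | some j => st.2.insert p.2 (max (st.2.getD p.2 (p.1 - j)) (p.1 - j))
    | none => st.2
  (st.1.insert p.2 p.1, best)

def max_separator_alt (txt : String) : List String :=
  let st := (PySem.List.enumerate txt.toList).foldl bStep (⟨[]⟩, ⟨[]⟩)
  if st.2.items.isEmpty then []
  else
    let m := (PySem.List.max? st.2.values id).getD 0
    PySem.List.sorted ((st.2.items.filter (fun p => p.2 == m)).map (fun p => String.singleton p.1)) id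

-- ===== PRECONDITION & SPEC =====
def Spec_max_separator (txt : String) (out : List String) : Prop := out = max_separator_alt txt
instance (txt : String) (out : List String) : Decidable (Spec_max_separator txt out) := by unfold Spec_max_separator; infer_instance

-- ===== CLAIM (what is proved, stated in full; the proofs are below) =====
def Claim_equal_max_separator : Prop := ∀ (txt : String), Dom_max_separator txt → Spec_max_separator txt (max_separator txt)

-- ===== LEMMAS AND PROOFS =====

-- indices attached to char c by the enumerated text
def occ (es : List (Int × Char)) (c : Char) : List Int :=
  es.filterMap (fun p => if p.2 = c then some p.1 else none)

theorem occ_cons (i : Int) (v : Char) (t : List (Int × Char)) (c : Char) :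
    occ ((i, v) :: t) c = if v = c then i :: occ t c else occ t c := by
  by_cases h : v = c <;> simp [occ, h]

-- consecutive differences
def diffs : List Int → List Int
  | a :: b :: t => (b - a) :: diffs (b :: t)
  | _ => []

-- max consecutive gap (0 if fewer than two indices)
def gm (l : List Int) : Int := (PySem.List.max? (diffs l) id).getD 0

theorem pymax_concat (l : List Int) (x : Int) :
    PySem.List.max? (l ++ [x]) id =
      some (match PySem.List.max? l id with | none => x | some m => max m x) := by
  simp only [PySem.List.max?, List.foldl_append, List.foldl_cons, List.foldl_nil]
  rcases List.foldl _ none l with _ | m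
  · rfl
  · simp only [id, max_def]
    split_ifs with h1 h2 h2 <;> simp <;> omega

theorem diffs_concat (l : List Int) (hl : l ≠ []) (i : Int) :
    diffs (l ++ [i]) = diffs l ++ [i - (l.getLast?).getD 0] := by
  induction l with
  | nil => simp at hl
  | cons a t ih =>
    cases t with
    | nil => simp [diffs]
    | cons b t' => simpa [diffs] using ih (by simp)

theorem pymax_isSome (l : List Int) (hl : l ≠ []) : (PySem.List.max? l id).isSome := by
  induction l using List.reverseRecOn with
  | nil => simp at hl
  | append_singleton u x ih => rw [pymax_concat]; rfl

theorem gm_concat (l : List Int) (hl : l ≠ []) (i : Int) :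
    gm (l ++ [i]) = max (if 1 < l.length then gm l else (i - (l.getLast?).getD 0))
                        (i - (l.getLast?).getD 0) := by
  unfold gm
  rw [diffs_concat l hl i, pymax_concat]
  rcases l with _ | ⟨a, t⟩
  · simp at hl
  rcases t with _ | ⟨b, t'⟩
  · simp [diffs, PySem.List.max?]
  · have hne : diffs (a :: b :: t') ≠ [] := by simp [diffs]
    rcases hmp : PySem.List.max? (diffs (a :: b :: t')) id with _ | m
    · have := pymax_isSome _ hne
      rw [hmp] at this; simp at this
    · simp

theorem keys_insert {ν : Type} (d : PySem.Dict Char ν) (k : Char) (v : ν) :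
    (d.insert k v).items.map Prod.fst =
      if d.contains k then d.items.map Prod.fst else d.items.map Prod.fst ++ [k] := by
  simp only [PySem.Dict.insert]
  split_ifs with h <;> simp [List.map_map]
  intro a b _
  split <;> simp_all

theorem not_mem_keys_of_not_contains {ν : Type} (d : PySem.Dict Char ν) (k : Char)
    (hc : ¬ d.contains k = true) : k ∉ d.items.map Prod.fst := by
  intro hmem
  apply hc
  simp only [PySem.Dict.contains, List.any_eq_true]
  obtain ⟨p, hp, hfst⟩ := List.mem_map.mp hmem
  exact ⟨p, hp, by simp [hfst]⟩

theorem nodup_keys_insert {ν : Type} (d : PySem.Dict Char ν) (k : Char) (v : ν)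
    (h : (d.items.map Prod.fst).Nodup) : ((d.insert k v).items.map Prod.fst).Nodup := by
  rw [keys_insert]
  split_ifs with hc
  · exact h
  · have hk := not_mem_keys_of_not_contains d k hc
    simp [List.nodup_append, h]
    intro a x hax hak
    exact hk (List.mem_map.mpr ⟨(a, x), hax, hak⟩)

theorem contains_iff {ν : Type} (d : PySem.Dict Char ν) (k : Char) :
    d.contains k = true ↔ (d.get? k).isSome := by
  simp [PySem.Dict.contains, PySem.Dict.get?, List.any_eq_true, List.find?_isSome]

theorem aStep_eq (d : PySem.Dict Char (List Int)) (p : Int × Char) :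
    aStep d p = d.insert p.2 ((d.getD p.2 []) ++ [p.1]) := by
  unfold aStep
  split_ifs with h
  · rfl
  · have : d.get? p.2 = none := by
      rcases ho : d.get? p.2 with _ | l
      · rfl
      · exact absurd ((contains_iff d p.2).mpr (by simp [ho])) h
    simp [PySem.Dict.getD, this]

theorem foldA_get (es : List (Int × Char)) (d : PySem.Dict Char (List Int)) (c : Char) :
    (es.foldl aStep d).get? c =
      match d.get? c with
      | some l => some (l ++ occ es c)
      | none => if occ es c = [] then none else some (occ es c) := by
  induction es generalizing d with
  | nil => rcases h : d.get? c with _ | l <;> simp [occ, h]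
  | cons p t ih =>
    obtain ⟨i, v⟩ := p
    rw [List.foldl_cons, ih, aStep_eq]
    rw [PySem.Dict.get?_insert]
    rw [occ_cons]
    by_cases hvc : v = c
    · subst hvc
      rcases h : d.get? v with _ | l
      · simp [PySem.Dict.getD, h]
      · simp [PySem.Dict.getD, h]
    · rw [if_neg (fun hh => hvc hh.symm), if_neg hvc]

theorem foldA_nodup (es : List (Int × Char)) (d : PySem.Dict Char (List Int))
    (h : (d.items.map Prod.fst).Nodup) :
    (((es.foldl aStep d).items.map Prod.fst)).Nodup := by
  induction es generalizing d with
  | nil => exact h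
  | cons p t ih =>
    rw [List.foldl_cons]
    apply ih
    unfold aStep
    split_ifs with hc
    · exact nodup_keys_insert _ _ _ h
    · exact nodup_keys_insert _ _ _ h

theorem contains_iff_mem {ν : Type} (d : PySem.Dict Char ν) (k : Char) :
    d.contains k = true ↔ k ∈ d.items.map Prod.fst := by
  simp [PySem.Dict.contains, List.any_eq_true, List.mem_map, beq_iff_eq]

theorem foldDiff_items (its : List (Char × List Int)) (dd : PySem.Dict Char Int)
    (hdisj : ∀ k ∈ its.map Prod.fst, dd.contains k = false)
    (hnd : (its.map Prod.fst).Nodup) :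
    (its.foldl aDiffStep dd).items =
      dd.items ++ its.filterMap (fun kv =>
        if 1 < kv.2.length then some (kv.1, (PySem.List.max? (aGaps kv.2) id).getD 0) else none) := by
  induction its generalizing dd with
  | nil => simp
  | cons kv t ih =>
    obtain ⟨k, v⟩ := kv
    rw [List.foldl_cons]
    have hknotin : dd.contains k = false := hdisj k (by simp)
    by_cases hlen : 1 < v.length
    · rw [show aDiffStep dd (k, v) = dd.insert k ((PySem.List.max? (aGaps v) id).getD 0) by
        simp [aDiffStep, hlen]]
      have hins : (dd.insert k ((PySem.List.max? (aGaps v) id).getD 0)).items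
          = dd.items ++ [(k, (PySem.List.max? (aGaps v) id).getD 0)] := by
        simp only [PySem.Dict.insert, hknotin]
        simp
      rw [ih]
      · rw [hins]
        simp [hlen]
      · intro k' hk'
        rcases Bool.eq_false_or_eq_true ((dd.insert k ((PySem.List.max? (aGaps v) id).getD 0)).contains k') with ht | hf
        swap
        · exact hf
        · exfalso
          have : k' ∈ (dd.insert k ((PySem.List.max? (aGaps v) id).getD 0)).items.map Prod.fst :=
            (contains_iff_mem _ _).mp ht
          rw [keys_insert] at this
          simp only [hknotin, Bool.false_eq_true, if_false] at this
          rcases List.mem_append.mp this with hmem | hmem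
          · exact absurd ((contains_iff_mem dd k').mpr hmem) (by simp [hdisj k' (by simp [hk'])])
          · simp only [List.mem_singleton] at hmem
            subst hmem
            exact (List.nodup_cons.mp (by simpa using hnd)).1 hk'
      · exact (List.nodup_cons.mp (by simpa using hnd)).2
    · rw [show aDiffStep dd (k, v) = dd by simp [aDiffStep, hlen], ih]
      · simp [hlen]
      · intro k' hk'; exact hdisj k' (by simp [hk'])
      · exact (List.nodup_cons.mp (by simpa using hnd)).2

theorem aGaps_aux (w : List Int) :
    ∀ (n k : Nat), w.length - k = n → k ≤ w.length →
    (PySem.List.enumerate (w.drop k) (k : Int)).filterMap (fun q =>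
      if q.1 ≠ (w.length : Int) - 1 then
        some ((PySem.List.pyGet? w (q.1 + 1)).getD 0 - (PySem.List.pyGet? w q.1).getD 0)
      else none) = diffs (w.drop k) := by
  intro n
  induction n with
  | zero =>
    intro k hn hk
    have : w.length = k := by omega
    rw [List.drop_of_length_le (by omega)]
    simp [PySem.List.enumerate, diffs]
  | succ n ih =>
    intro k hn hk
    have hklt : k < w.length := by omega
    rw [List.drop_eq_getElem_cons hklt]
    simp only [PySem.List.enumerate, List.filterMap_cons]
    by_cases hlast : k + 1 = w.length
    · have hc : ¬ ((k : Int) ≠ (w.length : Int) - 1) := by omega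
      rw [if_neg hc]
      have : w.drop (k + 1) = [] := List.drop_of_length_le (by omega)
      rw [show ((k : Int) + 1) = ((k + 1 : Nat) : Int) by push_cast; ring]
      rw [← this] at *
      have := ih (k + 1) (by omega) (by omega)
      rw [List.drop_of_length_le (by omega)] at this ⊢
      simp [PySem.List.enumerate, diffs]
    · have hc : ((k : Int) ≠ (w.length : Int) - 1) := by omega
      rw [if_pos hc]
      have hk1 : k + 1 < w.length := by omega
      have hg1 : (PySem.List.pyGet? w ((k : Int) + 1)).getD 0 = w[k + 1] := by
        rw [show ((k : Int) + 1) = ((k + 1 : Nat) : Int) by push_cast; ring]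
        simp only [PySem.List.pyGet?_natCast, List.getElem?_eq_getElem hk1,
          Option.getD_some]
      have hg0 : (PySem.List.pyGet? w ((k : Int))).getD 0 = w[k] := by
        simp only [PySem.List.pyGet?_natCast, List.getElem?_eq_getElem hklt,
          Option.getD_some]
      rw [hg1, hg0]
      rw [show ((k : Int) + 1) = ((k + 1 : Nat) : Int) by push_cast; ring]
      rw [ih (k + 1) (by omega) (by omega)]
      rw [List.drop_eq_getElem_cons hk1]
      simp [diffs, ← List.drop_eq_getElem_cons hk1]

theorem aGaps_eq (v : List Int) : aGaps v = diffs v := by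
  have := aGaps_aux v v.length 0 (by omega) (by omega)
  simpa [aGaps] using this

theorem foldB_inv (es : List (Int × Char)) (last best : PySem.Dict Char Int)
    (g : Char → List Int)
    (h1 : ∀ c, last.get? c = (g c).getLast?)
    (h2 : ∀ c, best.get? c = if 1 < (g c).length then some (gm (g c)) else none)
    (h3 : (best.items.map Prod.fst).Nodup) :
    (∀ c, (es.foldl bStep (last, best)).2.get? c =
        if 1 < (g c ++ occ es c).length then some (gm (g c ++ occ es c)) else none)
    ∧ ((es.foldl bStep (last, best)).2.items.map Prod.fst).Nodup := by
  induction es generalizing last best g with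
  | nil =>
    refine ⟨fun c => ?_, h3⟩
    simpa [occ] using h2 c
  | cons p t ih =>
    obtain ⟨i, v⟩ := p
    rw [List.foldl_cons]
    set g₁ : Char → List Int := fun c => if c = v then g c ++ [i] else g c with hg₁
    have hcomp : ∀ c, g₁ c ++ occ t c = g c ++ occ ((i, v) :: t) c := by
      intro c
      rw [occ_cons]
      by_cases hc : c = v
      · subst hc; simp [hg₁, List.append_assoc]
      · have hvc : ¬ v = c := fun h => hc h.symm
        simp [hg₁, hc, hvc]
    suffices hmain :
        (∀ c, (t.foldl bStep (bStep (last, best) (i, v))).2.get? c =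
            if 1 < (g₁ c ++ occ t c).length then some (gm (g₁ c ++ occ t c)) else none)
        ∧ ((t.foldl bStep (bStep (last, best) (i, v))).2.items.map Prod.fst).Nodup by
      obtain ⟨ha, hb⟩ := hmain
      refine ⟨fun c => ?_, hb⟩
      rw [← hcomp c]
      exact ha c
    -- establish invariant for the new state
    rcases hgv : g v with _ | ⟨x, l'⟩
    · -- first occurrence of v
      have hlv : last.get? v = none := by rw [h1, hgv]; rfl
      have hstep : bStep (last, best) (i, v) = (last.insert v i, best) := by
        simp [bStep, hlv]
      rw [hstep]
      apply ih
      · intro c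
        rw [PySem.Dict.get?_insert]
        by_cases hc : c = v
        · subst hc; simp [hg₁, hgv]
        · simp [hg₁, hc, h1 c]
      · intro c
        by_cases hc : c = v
        · subst hc; simp [hg₁, hgv, h2 c]
        · simp [hg₁, hc, h2 c]
      · exact h3
    · -- repeat occurrence
      have hne : g v ≠ [] := by rw [hgv]; simp
      set j := ((g v).getLast?).getD 0 with hj
      have hlv : last.get? v = some j := by
        rw [h1, hj]
        rcases hgl : (g v).getLast? with _ | y
        · rw [hgv] at hgl; simp at hgl
        · simp
      have hstep : bStep (last, best) (i, v)
          = (last.insert v i, best.insert v (max (best.getD v (i - j)) (i - j))) := by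
        simp [bStep, hlv]
      rw [hstep]
      have hbval : max (best.getD v (i - j)) (i - j) = gm (g v ++ [i]) := by
        rw [gm_concat (g v) hne i, ← hj]
        congr 1
        rw [PySem.Dict.getD, h2 v]
        split_ifs with h
        · simp
        · simp
      apply ih
      · intro c
        rw [PySem.Dict.get?_insert]
        by_cases hc : c = v
        · subst hc; simp [hg₁]
        · simp [hg₁, hc, h1 c]
      · intro c
        rw [PySem.Dict.get?_insert]
        by_cases hc : c = v
        · subst hc
          rw [if_pos rfl, hbval]
          rw [if_pos (by simp [hg₁, hgv])]
          simp [hg₁]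
        · simp [hg₁, hc, h2 c]
      · exact nodup_keys_insert _ _ _ h3

theorem assoc_perm (l₁ l₂ : List (Char × Int))
    (h₁ : (l₁.map Prod.fst).Nodup) (h₂ : (l₂.map Prod.fst).Nodup)
    (h : ∀ c, l₁.find? (fun p => p.1 == c) = l₂.find? (fun p => p.1 == c)) :
    l₁.Perm l₂ := by
  induction l₁ generalizing l₂ with
  | nil =>
    rcases l₂ with _ | ⟨p, t⟩
    · exact List.Perm.refl _
    · have := h p.1
      simp [List.find?_cons_of_pos] at this
  | cons kv t ih =>
    obtain ⟨k, v⟩ := kv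
    have hfind : l₂.find? (fun p => p.1 == k) = some (k, v) := by
      rw [← h k]
      simp
    obtain ⟨hpk, a, b, rfl, ha⟩ := List.find?_eq_some_iff_append.mp hfind
    have hknota : ∀ p ∈ a, p.1 ≠ k := by
      intro p hp
      have := ha p hp
      simpa using this
    have hknotb : k ∉ b.map Prod.fst := by
      have := h₂
      simp only [List.map_append, List.map_cons] at this
      rw [List.nodup_append] at this
      have h2 := this.2
      rw [List.nodup_cons] at h2
      exact h2.1.1
    have hperm2 : (a ++ (k, v) :: b).Perm ((k, v) :: (a ++ b)) :=
      List.perm_middle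
    refine List.Perm.trans (List.Perm.cons (k, v) (ih _ ?_ ?_ ?_)) hperm2.symm
    · have h₁' := h₁
      simp only [List.map_cons, List.nodup_cons] at h₁'
      exact h₁'.2
    · have := h₂
      simp only [List.map_append, List.map_cons] at this
      rw [List.nodup_append] at this
      obtain ⟨hna, hnb, hdis⟩ := this
      rw [List.nodup_cons] at hnb
      rw [List.map_append, List.nodup_append]
      refine ⟨hna, hnb.2, ?_⟩
      intro x hx y hy
      exact hdis x hx y (List.mem_cons_of_mem _ hy)
    · intro c
      by_cases hck : c = k
      · subst hck
        have h₁' := h₁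
        simp only [List.map_cons, List.nodup_cons] at h₁'
        have hnone : t.find? (fun p => p.1 == c) = none := by
          rcases hf : t.find? (fun p => p.1 == c) with _ | q
          · exact hf
          · exfalso
            have hq := List.find?_some hf
            have hqmem := List.mem_of_find?_eq_some hf
            exact h₁'.1 (List.mem_map.mpr ⟨q, hqmem, by simpa using hq⟩)
        rw [hnone]
        rcases hf : (a ++ b).find? (fun p => p.1 == c) with _ | q
        · exact hf.symm
        · exfalso
          have hq := List.find?_some hf
          have hqmem := List.mem_of_find?_eq_some hf
          rcases List.mem_append.mp hqmem with hm | hm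
          · exact hknota q hm (by simpa using hq)
          · exact hknotb (List.mem_map.mpr ⟨q, hm, by simpa using hq⟩)
      · have hkc : (k == c) = false := by
          simp only [beq_eq_false_iff_ne]
          exact fun hkc => hck hkc.symm
        have hl : t.find? (fun p => p.1 == c) = ((k, v) :: t).find? (fun p => p.1 == c) := by
          simp [hkc]
        rw [hl, h c]
        rw [List.find?_append, List.find?_append]
        congr 1
        simp [hkc]

theorem pymax_perm (l₁ l₂ : List Int) (h : l₁.Perm l₂) :
    PySem.List.max? l₁ id = PySem.List.max? l₂ id := by
  rcases h1 : PySem.List.max? l₁ id with _ | m₁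
  · rcases h2 : PySem.List.max? l₂ id with _ | m₂
    · rfl
    · exfalso
      have hm := PySem.List.max?_mem h2
      have : l₁ ≠ [] := by
        intro hnil; subst hnil
        exact absurd (h.mem_iff.mpr hm) (by simp)
      have := pymax_isSome l₁ this
      rw [h1] at this; simp at this
  · rcases h2 : PySem.List.max? l₂ id with _ | m₂
    · exfalso
      have hm := PySem.List.max?_mem h1
      have : l₂ ≠ [] := by
        intro hnil; subst hnil
        exact absurd (h.mem_iff.mp hm) (by simp)
      have := pymax_isSome l₂ this
      rw [h2] at this; simp at this
    · have hm₁ := PySem.List.max?_mem h1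
      have hm₂ := PySem.List.max?_mem h2
      have hle₁ : m₁ ≤ m₂ := PySem.List.max?_isMax h2 m₁ (h.mem_iff.mp hm₁)
      have hle₂ : m₂ ≤ m₁ := PySem.List.max?_isMax h1 m₂ (h.mem_iff.mpr hm₂)
      rw [le_antisymm hle₁ hle₂]

theorem sorted_eq_of_perm_nodup (l₁ l₂ : List String) (h : l₁.Perm l₂) (hnd : l₁.Nodup) :
    PySem.List.sorted l₁ id = PySem.List.sorted l₂ id := by
  have hp1 : (PySem.List.sorted l₁ id).Perm l₁ := PySem.List.sorted_perm l₁ id false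
  have hlt : List.Pairwise (fun a b : String => id a < id b) (PySem.List.sorted l₁ id) := by
    have hle := PySem.List.sorted_pairwise l₁ id
    have hnd' : (PySem.List.sorted l₁ id).Nodup := hp1.nodup_iff.mpr hnd
    exact List.Pairwise.imp₂ (fun a b hab hne => lt_of_le_of_ne hab hne) hle hnd'
  have e1 : PySem.List.sorted l₁ id = PySem.List.sorted l₁ id :=
    rfl
  have e2 : PySem.List.sorted l₂ id = PySem.List.sorted l₁ id :=
    PySem.List.sorted_eq_of_perm_of_pairwise_lt l₂ (PySem.List.sorted l₁ id) id
      (hp1.trans h) hlt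
  rw [e2]

theorem singleton_inj : Function.Injective String.singleton := by
  intro a b h
  have := congrArg String.toList h
  simpa [String.singleton] using this

theorem keys_filterMap (its : List (Char × List Int)) :
    ((its.filterMap (fun kv =>
      if 1 < kv.2.length then some (kv.1, (PySem.List.max? (aGaps kv.2) id).getD 0) else none)).map Prod.fst).Sublist
      (its.map Prod.fst) := by
  induction its with
  | nil => simp
  | cons kv t ih =>
    rcases kv with ⟨k, v⟩
    by_cases h : 1 < v.length
    · simpa [List.filterMap_cons, h] using ih.cons₂ k
    · simp only [List.filterMap_cons, h, if_false, List.map_cons]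
      exact ih.trans (List.sublist_cons_self _ _)

theorem find?_none_of_not_mem {ν : Type} (l : List (Char × ν)) (c : Char)
    (h : c ∉ l.map Prod.fst) : l.find? (fun p => p.1 == c) = none := by
  rw [List.find?_eq_none]
  intro p hp
  simp only [beq_iff_eq]
  intro hpc
  exact h (List.mem_map.mpr ⟨p, hp, hpc⟩)

theorem find?_filterMap (its : List (Char × List Int)) (c : Char)
    (hnd : (its.map Prod.fst).Nodup) :
    (its.filterMap (fun kv =>
      if 1 < kv.2.length then some (kv.1, (PySem.List.max? (aGaps kv.2) id).getD 0) else none)).find?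
        (fun p => p.1 == c) =
      match its.find? (fun p => p.1 == c) with
      | none => none
      | some (k, v) => if 1 < v.length then some (k, (PySem.List.max? (aGaps v) id).getD 0) else none := by
  induction its with
  | nil => simp
  | cons kv t ih =>
    rcases kv with ⟨k, v⟩
    have hnd' := hnd
    simp only [List.map_cons, List.nodup_cons] at hnd'
    by_cases hkc : k = c
    · subst hkc
      rw [List.find?_cons_of_pos (by simp)]
      by_cases h : 1 < v.length
      · simp only [List.filterMap_cons, h, if_true]
        rw [List.find?_cons_of_pos (by simp)]
      · simp only [List.filterMap_cons, h, if_false]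
        rw [find?_none_of_not_mem _ k (fun hmem => hnd'.1 ((keys_filterMap t).mem hmem))]
    · have hbeq : (k == c) = false := by simpa using hkc
      rw [List.find?_cons_of_neg (by simp [hbeq])]
      by_cases h : 1 < v.length
      · simp only [List.filterMap_cons, h, if_true]
        rw [List.find?_cons_of_neg (by simp [hbeq])]
        exact ih hnd'.2
      · simp only [List.filterMap_cons, h, if_false]
        exact ih hnd'.2

theorem find?_char {ν : Type} (l : List (Char × ν)) (c : Char) :
    l.find? (fun p => p.1 == c) = ((PySem.Dict.mk l).get? c).map (fun v => (c, v)) := by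
  rcases hf : l.find? (fun p => p.1 == c) with _ | p
  · simp [PySem.Dict.get?, hf]
  · have h1 := List.find?_some hf
    simp only [beq_iff_eq] at h1
    simp [PySem.Dict.get?, hf, Prod.ext_iff, h1]


-- the common tail of both ports, as a function of the dict's items
theorem finish_eq (l₁ l₂ : List (Char × Int)) (h : l₁.Perm l₂) (hnd : (l₁.map Prod.fst).Nodup) :
    (if l₁.isEmpty then []
     else PySem.List.sorted ((l₁.filter (fun p => p.2 == (PySem.List.max? (l₁.map Prod.snd) id).getD 0)).map
            (fun p => String.singleton p.1)) id) =
    (if l₂.isEmpty then ([] : List String)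
     else PySem.List.sorted ((l₂.filter (fun p => p.2 == (PySem.List.max? (l₂.map Prod.snd) id).getD 0)).map
            (fun p => String.singleton p.1)) id) := by
  have hemp : l₁.isEmpty = l₂.isEmpty := by
    rcases l₁ with _ | ⟨p, t⟩
    · rw [h.symm.eq_nil]
    · rcases l₂ with _ | ⟨q, u⟩
      · exact absurd h.eq_nil (by simp)
      · rfl
  rw [hemp]
  by_cases he : l₂.isEmpty
  · rw [if_pos he, if_pos he]
  · rw [if_neg he, if_neg he]
    have hmax : PySem.List.max? (l₁.map Prod.snd) id = PySem.List.max? (l₂.map Prod.snd) id :=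
      pymax_perm _ _ (h.map Prod.snd)
    rw [hmax]
    apply sorted_eq_of_perm_nodup
    · exact (h.filter _).map _
    · have h1 : ((l₁.filter (fun p => p.2 == (PySem.List.max? (l₂.map Prod.snd) id).getD 0)).map
          Prod.fst).Nodup :=
        hnd.sublist (List.filter_sublist.map Prod.fst)
      have h2 : (l₁.filter (fun p => p.2 == (PySem.List.max? (l₂.map Prod.snd) id).getD 0)).map
          (fun p => String.singleton p.1)
          = ((l₁.filter (fun p => p.2 == (PySem.List.max? (l₂.map Prod.snd) id).getD 0)).map
              Prod.fst).map String.singleton := by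
        simp [List.map_map, Function.comp_def]
      rw [h2]
      exact h1.map singleton_inj

-- ===== VERDICT (by name: the statement is the Claim_ definition above) =====
theorem max_separator_spec : Claim_equal_max_separator := by
  intro txt _
  unfold Spec_max_separator max_separator max_separator_alt
  -- name the shared enumeration and the three folds
  have hnd_td : (((PySem.List.enumerate txt.toList 0).foldl aStep ⟨[]⟩).items.map Prod.fst).Nodup :=
    foldA_nodup _ _ (by simp)
  have hdd_items : (((PySem.List.enumerate txt.toList 0).foldl aStep ⟨[]⟩).items.foldl aDiffStep ⟨[]⟩).items
      = ((PySem.List.enumerate txt.toList 0).foldl aStep ⟨[]⟩).items.filterMap (fun kv =>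
          if 1 < kv.2.length then some (kv.1, (PySem.List.max? (aGaps kv.2) id).getD 0) else none) := by
    rw [foldDiff_items _ _ (fun k _ => rfl) hnd_td]
    rfl
  have hdd_nodup : ((((PySem.List.enumerate txt.toList 0).foldl aStep ⟨[]⟩).items.foldl aDiffStep ⟨[]⟩).items.map Prod.fst).Nodup := by
    rw [hdd_items]
    exact hnd_td.sublist (keys_filterMap _)
  have hbest := foldB_inv (PySem.List.enumerate txt.toList 0) ⟨[]⟩ ⟨[]⟩ (fun _ => [])
    (fun c => by simp [PySem.Dict.get?]) (fun c => by simp [PySem.Dict.get?]) (by simp)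
  have hbget : ∀ c, ((PySem.List.enumerate txt.toList 0).foldl bStep (⟨[]⟩, ⟨[]⟩)).2.get? c
      = if 1 < (occ (PySem.List.enumerate txt.toList 0) c).length
        then some (gm (occ (PySem.List.enumerate txt.toList 0) c)) else none := by
    intro c
    simpa using hbest.1 c
  have hdget : ∀ c, (((PySem.List.enumerate txt.toList 0).foldl aStep ⟨[]⟩).items.foldl aDiffStep ⟨[]⟩).get? c
      = if 1 < (occ (PySem.List.enumerate txt.toList 0) c).length
        then some (gm (occ (PySem.List.enumerate txt.toList 0) c)) else none := by
    intro c
    have hfc : (((PySem.List.enumerate txt.toList 0).foldl aStep ⟨[]⟩).items.foldl aDiffStep ⟨[]⟩).get? c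
        = Option.map Prod.snd ((((PySem.List.enumerate txt.toList 0).foldl aStep ⟨[]⟩).items.foldl aDiffStep ⟨[]⟩).items.find? (fun p => p.1 == c)) := rfl
    rw [hfc, hdd_items, find?_filterMap _ _ hnd_td]
    have htd_find : ((PySem.List.enumerate txt.toList 0).foldl aStep ⟨[]⟩).items.find? (fun p => p.1 == c)
        = (((PySem.List.enumerate txt.toList 0).foldl aStep ⟨[]⟩).get? c).map (fun v => (c, v)) :=
      find?_char _ c
    rw [htd_find, foldA_get]
    rcases hocc : occ (PySem.List.enumerate txt.toList 0) c with _ | ⟨x, t⟩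
    · simp [PySem.Dict.get?]
    · simp only [show (PySem.Dict.mk ([] : List (Char × List Int))).get? c = none by simp [PySem.Dict.get?]]
      rw [← hocc]
      rw [if_neg (by simp [hocc])]
      simp only [Option.map_some]
      by_cases hlen : 1 < (occ (PySem.List.enumerate txt.toList 0) c).length
      · rw [if_pos hlen, if_pos hlen]
        simp [aGaps_eq, gm]
      · rw [if_neg hlen, if_neg hlen]
        rfl
  have hperm : ((((PySem.List.enumerate txt.toList 0).foldl aStep ⟨[]⟩).items.foldl aDiffStep ⟨[]⟩)).items.Perm
      (((PySem.List.enumerate txt.toList 0).foldl bStep (⟨[]⟩, ⟨[]⟩)).2.items) := by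
    apply assoc_perm _ _ hdd_nodup hbest.2
    intro c
    rw [find?_char _ c, find?_char _ c]
    rw [show ∀ (d : PySem.Dict Char Int), PySem.Dict.mk d.items = d from fun _ => rfl,
        show ∀ (d : PySem.Dict Char Int), PySem.Dict.mk d.items = d from fun _ => rfl]
    rw [hdget c, hbget c]
  exact finish_eq _ _ hperm hdd_nodup
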